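-- pv_equiv track=rewrite | github.com/tomsnx/BUT_Info_Public | Semester_1/DiscreteMathematics/TP3/TP3.py | racine
-- ===== SOURCE A (Python) =====
-- def racine(n):
--     a = 1
--     b = n
--     if b < 2:
--         return False
--
--     while (b % 4 == 0): # boucle pour les 2
--         b //= 4
--         a *= 2
--
--     d = 3
--     while(d * d <= b): # boucle pour les impairs
--         if b%(d*d) == 0:
--             b //= d*d
--             a *= d
--         else:
--             d += 2
--     return a, b
-- ===== SOURCE B (Python) =====
-- def racine(n):
--     if n < 2:
--         return False
--     a = 1
--     k = 1
--     while k * k <= n: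
--         if n % (k * k) == 0:
--             a = k
--         k += 1
--     return a, n // (a * a)
-- ===== Notes on version B (the rewrite author's own statement) =====
-- stated objective: simpler
-- what changed: B replaces A's two square-stripping loops (dividing out 4s, then odd d*d factors, returning the shrunken remainder) with a single upward scan that records the largest k with k*k dividing n, returning (k, n // k**2).
-- outside the precondition, e.g. on racine(0): A returns False, B returns False; on racine(1): A returns False, B returns False
import Mathlib
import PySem

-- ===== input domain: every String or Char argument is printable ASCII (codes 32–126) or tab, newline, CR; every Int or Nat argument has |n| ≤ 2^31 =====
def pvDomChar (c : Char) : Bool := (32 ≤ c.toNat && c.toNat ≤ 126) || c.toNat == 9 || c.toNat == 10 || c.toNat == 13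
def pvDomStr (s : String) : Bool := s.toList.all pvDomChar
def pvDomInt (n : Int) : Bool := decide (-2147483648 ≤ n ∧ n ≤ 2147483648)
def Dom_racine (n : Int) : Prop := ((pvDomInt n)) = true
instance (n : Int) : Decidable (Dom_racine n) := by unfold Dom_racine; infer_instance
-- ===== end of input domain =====

-- B finds the square part by scanning for the largest k with k*k dividing n, instead of
-- stripping square prime factors like A: a simpler, structurally different algorithm (not faster).

-- ===== PORT A =====
-- while b % 4 == 0: b //= 4; a *= 2   (fuel only makes the loop total; it is never exhausted on the call below)
def racineLoop4 : Nat → Int → Int → Int × Int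
  | 0, a, b => (a, b)
  | fuel + 1, a, b =>
    if PySem.Int.mod b 4 = 0 then racineLoop4 fuel (a * 2) (PySem.Int.floordiv b 4)
    else (a, b)

-- while d*d <= b: if b % (d*d) == 0 then b //= d*d; a *= d else d += 2   (fuel = totality guard only)
def racineLoopOdd : Nat → Int → Int → Int → Int × Int
  | 0, a, b, _ => (a, b)
  | fuel + 1, a, b, d =>
    if d * d ≤ b then
      if PySem.Int.mod b (d * d) = 0 then
        racineLoopOdd fuel (a * d) (PySem.Int.floordiv b (d * d)) d
      else
        racineLoopOdd fuel a b (d + 2)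
    else (a, b)

def racine (n : Int) : Option (Int × Int) :=
  let a : Int := 1
  let b : Int := n
  if b < 2 then none
  else
    match racineLoop4 (b.toNat + 1) a b with
    | (a, b) =>
      match racineLoopOdd (2 * b.toNat + 2) a b 3 with
      | (a, b) => some (a, b)

-- ===== PORT B =====
-- while k*k <= n: if n % (k*k) == 0 then a = k; k += 1
def racineAltLoop (a k n : Int) : Int :=
  if h : k * k ≤ n then
    racineAltLoop (if PySem.Int.mod n (k * k) = 0 then k else a) (k + 1) n
  else a
termination_by (n + 1 - k).toNat
decreasing_by
  have hk : k ≤ n := by rcases le_total k 0 with h0 | h0 <;> nlinarith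
  omega

def racine_alt (n : Int) : Option (Int × Int) :=
  if n < 2 then none
  else
    let a := racineAltLoop 1 1 n
    some (a, PySem.Int.floordiv n (a * a))

-- ===== PRECONDITION & SPEC =====
-- Pre_ excludes n < 2, where A returns the bare boolean False, a value outside the
-- declared Optional[tuple[int,int]] return type (B does the same there).
def Pre_racine (n : Int) : Prop := 2 ≤ n
instance (n : Int) : Decidable (Pre_racine n) := by unfold Pre_racine; infer_instance
def pvWitness_racine : Int := 12

def Spec_racine (n : Int) (out : Option (Int × Int)) : Prop := out = racine_alt n
instance (n : Int) (out : Option (Int × Int)) : Decidable (Spec_racine n out) := by unfold Spec_racine; infer_instance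

-- ===== CLAIM (what is proved, stated in full; the proofs are below) =====
def Claim_equal_racine : Prop := ∀ (n : Int), Dom_racine n → Pre_racine n → Spec_racine n (racine n)

-- ===== LEMMAS AND PROOFS =====

theorem loop4_spec : ∀ (fuel : Nat) (a b : Int), 1 ≤ a → 1 ≤ b → b.toNat ≤ fuel →
    ∃ a' b', racineLoop4 fuel a b = (a', b') ∧ 1 ≤ a' ∧ 1 ≤ b' ∧
      a' * a' * b' = a * a * b ∧ ¬ (4:Int) ∣ b' := by
  intro fuel
  induction fuel with
  | zero => intro a b _ hb hf; omega
  | succ f ih =>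
    intro a b ha hb hf
    by_cases hm : PySem.Int.mod b 4 = 0
    · have hd : (4:Int) ∣ b := (PySem.Int.mod_eq_zero_iff_dvd b 4).mp hm
      obtain ⟨c, hc⟩ := hd
      have hd : (4:Int) ∣ b := ⟨c, hc⟩
      have he : b / 4 = c := by rw [hc]; exact Int.mul_ediv_cancel_left c (by norm_num)
      have hc1 : 1 ≤ c := by nlinarith
      have hcf : c.toNat ≤ f := by omega
      obtain ⟨a', b', heq, h1, h2, h3, h4⟩ := ih (a * 2) c (by nlinarith) hc1 hcf
      refine ⟨a', b', ?_, h1, h2, ?_, h4⟩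
      · simp [racineLoop4, hd, he, heq]
      · rw [h3, hc]; ring
    · have hd : ¬ (4:Int) ∣ b := fun hdvd => hm ((PySem.Int.mod_eq_zero_iff_dvd b 4).mpr hdvd)
      exact ⟨a, b, by simp [racineLoop4, hd], ha, hb, rfl, hd⟩

theorem loopOdd_spec : ∀ (fuel : Nat) (a b d : Int), 1 ≤ a → 1 ≤ b → 3 ≤ d → d % 2 = 1 →
    (∀ e : Int, 3 ≤ e → e % 2 = 1 → e < d → ¬ e * e ∣ b) → ¬ (4:Int) ∣ b →
    b.toNat + (b.toNat + 1 - d.toNat) < fuel →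
    ∃ a' b', racineLoopOdd fuel a b d = (a', b') ∧ 1 ≤ a' ∧ 1 ≤ b' ∧
      a' * a' * b' = a * a * b ∧ ¬ (4:Int) ∣ b' ∧
      (∀ e : Int, 3 ≤ e → e % 2 = 1 → ¬ e * e ∣ b') := by
  intro fuel
  induction fuel with
  | zero => intro a b d _ hb _ _ _ _ hf; omega
  | succ f ih =>
    intro a b d ha hb hd3 hdo hinv h4 hf
    by_cases hle : d * d ≤ b
    · have hdb : d ≤ b := by nlinarith
      by_cases hm : PySem.Int.mod b (d * d) = 0
      · have hdvd : d * d ∣ b := (PySem.Int.mod_eq_zero_iff_dvd b (d * d)).mp hm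
        obtain ⟨c, hc⟩ := hdvd
        have hdvd : d * d ∣ b := ⟨c, hc⟩
        have hdd : (0:Int) < d * d := by nlinarith
        have he : b / (d * d) = c := by rw [hc]; exact Int.mul_ediv_cancel_left c (ne_of_gt hdd)
        have hc1 : 1 ≤ c := by nlinarith
        have hcb : c < b := by nlinarith
        have hfuel' : c.toNat + (c.toNat + 1 - d.toNat) < f := by omega
        have hinv' : ∀ e : Int, 3 ≤ e → e % 2 = 1 → e < d → ¬ e * e ∣ c := by
          intro e h1 h2 h3 hdv
          exact hinv e h1 h2 h3 (hc ▸ hdv.mul_left (d * d))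
        have h4' : ¬ (4:Int) ∣ c := fun hdv => h4 (hc ▸ hdv.mul_left (d * d))
        obtain ⟨a', b', heq, h1, h2, h3, h44, hsf⟩ :=
          ih (a * d) c d (by nlinarith) hc1 hd3 hdo hinv' h4' hfuel'
        have hfd : PySem.Int.floordiv b (d * d) = c := by
          rw [PySem.Int.floordiv_eq_ediv_of_pos hdd]; exact he
        refine ⟨a', b', ?_, h1, h2, ?_, h44, hsf⟩
        · simp [racineLoopOdd, hle, hm, hfd, heq]
        · rw [h3, hc]; ring
      · have hnd : ¬ d * d ∣ b := fun hdv => hm ((PySem.Int.mod_eq_zero_iff_dvd b (d * d)).mpr hdv)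
        have hinv' : ∀ e : Int, 3 ≤ e → e % 2 = 1 → e < d + 2 → ¬ e * e ∣ b := by
          intro e h1 h2 h3
          by_cases hed : e < d
          · exact hinv e h1 h2 hed
          · have : e = d ∨ e = d + 1 := by omega
            rcases this with rfl | rfl
            · exact hnd
            · omega
        have hfuel' : b.toNat + (b.toNat + 1 - (d + 2).toNat) < f := by omega
        obtain ⟨a', b', heq, h1, h2, h3, h44, hsf⟩ :=
          ih a b (d + 2) ha hb (by omega) (by omega) hinv' h4 hfuel'
        exact ⟨a', b', by simp [racineLoopOdd, hle, hm, heq], h1, h2, h3, h44, hsf⟩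
    · have hbdd : b < d * d := not_le.mp hle
      refine ⟨a, b, by simp [racineLoopOdd, hle], ha, hb, rfl, h4, ?_⟩
      intro e he3 heo hdvd
      by_cases h : e < d
      · exact hinv e he3 heo h hdvd
      · have h1 : e * e ≤ b := Int.le_of_dvd (by omega) hdvd
        have h2 : d * d ≤ e * e := by nlinarith
        linarith

theorem squarefree_bridge (b : Int) (h1 : 1 ≤ b) (h4 : ¬ (4:Int) ∣ b)
    (hodd : ∀ e : Int, 3 ≤ e → e % 2 = 1 → ¬ e * e ∣ b) : Squarefree b.toNat := by
  rw [Nat.squarefree_iff_prime_squarefree]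
  intro p hp hdvd
  have hpp : p.Prime := hp
  have hbN : ((b.toNat : Int)) = b := Int.toNat_of_nonneg (by omega)
  have hdZ : ((p:Int) * p) ∣ b := by
    have h := Int.natCast_dvd_natCast.mpr hdvd
    push_cast at h; rwa [hbN] at h
  by_cases h2 : p = 2
  · subst h2
    exact h4 (by norm_num at hdZ; exact hdZ)
  · have hodd2 : p % 2 = 1 := Nat.odd_iff.mp (hpp.odd_of_ne_two h2)
    have hp3 : 3 ≤ p := by have := hpp.two_le; omega
    exact hodd (p:Int) (by exact_mod_cast hp3) (by omega) hdZ

theorem sq_dvd_nat (A B k : Nat) (hA : A ≠ 0) (hk : k ≠ 0) (hB : Squarefree B)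
    (h : k * k ∣ A * A * B) : k ∣ A := by
  have hB0 : B ≠ 0 := hB.ne_zero
  rw [← Nat.factorization_le_iff_dvd hk hA, Finsupp.le_def]
  intro p
  have h2 := (Nat.factorization_le_iff_dvd (mul_ne_zero hk hk) (by positivity)).mpr h
  rw [Finsupp.le_def] at h2
  have h3 := h2 p
  rw [Nat.factorization_mul hk hk, Nat.factorization_mul (mul_ne_zero hA hA) hB0,
    Nat.factorization_mul hA hA] at h3
  simp only [Finsupp.add_apply] at h3
  have h5 := hB.natFactorization_le_one p
  omega

theorem loopAlt_spec : ∀ (μ : Nat) (a k n : Int), 1 ≤ n → 1 ≤ k → 1 ≤ a → a ≤ k →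
    a * a ∣ n → (∀ j : Int, 1 ≤ j → j < k → j * j ∣ n → j ≤ a) →
    (n + 1 - k).toNat ≤ μ →
    1 ≤ racineAltLoop a k n ∧ racineAltLoop a k n * racineAltLoop a k n ∣ n ∧
      (∀ j : Int, 1 ≤ j → j * j ∣ n → j ≤ racineAltLoop a k n) := by
  intro μ
  induction μ with
  | zero =>
    intro a k n hn hk ha hak hdvd hmax hμ
    have h0 : n + 1 ≤ k := by omega
    have hkk : ¬ k * k ≤ n := by nlinarith
    rw [racineAltLoop, dif_neg hkk]
    refine ⟨ha, hdvd, ?_⟩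
    intro j hj hjd
    by_cases hjk : j < k
    · exact hmax j hj hjk hjd
    · exfalso
      have hle : j * j ≤ n := Int.le_of_dvd (by omega) hjd
      nlinarith
  | succ μ ih =>
    intro a k n hn hk ha hak hdvd hmax hμ
    by_cases hkk : k * k ≤ n
    · rw [racineAltLoop, dif_pos hkk]
      have hkn : k ≤ n := by nlinarith
      refine ih _ (k + 1) n hn (by omega) ?_ ?_ ?_ ?_ (by omega)
      · split
        · omega
        · exact ha
      · split
        · omega
        · omega
      · split
        · next hz => exact (PySem.Int.mod_eq_zero_iff_dvd n (k * k)).mp hz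
        · exact hdvd
      · intro j hj hjk hjd
        by_cases hjlt : j < k
        · have h1 := hmax j hj hjlt hjd
          split
          · omega
          · exact h1
        · have hjek : j = k := by omega
          subst hjek
          have hz : PySem.Int.mod n (j * j) = 0 := (PySem.Int.mod_eq_zero_iff_dvd n (j * j)).mpr hjd
          rw [if_pos hz]
    · rw [racineAltLoop, dif_neg hkk]
      refine ⟨ha, hdvd, ?_⟩
      intro j hj hjd
      by_cases hjk : j < k
      · exact hmax j hj hjk hjd
      · exfalso
        have hle : j * j ≤ n := Int.le_of_dvd (by omega) hjd
        nlinarith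

-- ===== VERDICT (by name: the statement is the Claim_ definition above) =====
theorem racine_spec : Claim_equal_racine := by
  unfold Claim_equal_racine Spec_racine
  intro n _ hpre
  have hn : 2 ≤ n := hpre
  have hn2 : ¬ n < 2 := by omega
  · obtain ⟨a1, b1, heq1, ha1, hb1, hm1, h41⟩ :=
      loop4_spec (n.toNat + 1) 1 n (by omega) (by omega) (by omega)
    obtain ⟨a2, b2, heq2, ha2, hb2, hm2, h42, hsf⟩ :=
      loopOdd_spec (2 * b1.toNat + 2) a1 b1 3 ha1 hb1 (by omega) (by norm_num)
        (fun e h1 _ h3 => by omega) h41 (by omega)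
    have hA : racine n = some (a2, b2) := by
      simp only [racine]
      rw [if_neg hn2, heq1]
      simp only []
      rw [heq2]
    obtain ⟨hg1, hgd, hgmax⟩ :=
      loopAlt_spec n.toNat 1 1 n (by omega) le_rfl le_rfl le_rfl ⟨n, by ring⟩
        (fun j h1 h2 _ => by omega) (by omega)
    have hn_eq : a2 * a2 * b2 = n := by rw [hm2, hm1]; ring
    have hdvd2 : a2 * a2 ∣ n := ⟨b2, by rw [← hn_eq]⟩
    have hle1 : a2 ≤ racineAltLoop 1 1 n := hgmax a2 ha2 hdvd2
    have hsq : Squarefree b2.toNat := squarefree_bridge b2 hb2 h42 hsf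
    have hgg : racineAltLoop 1 1 n * racineAltLoop 1 1 n ∣ a2 * a2 * b2 := hn_eq ▸ hgd
    have hKA : (racineAltLoop 1 1 n).toNat ∣ a2.toNat := by
      apply sq_dvd_nat a2.toNat b2.toNat _ (by omega) (by omega) hsq
      have hc : (((racineAltLoop 1 1 n).toNat * (racineAltLoop 1 1 n).toNat : ℕ) : ℤ) ∣
          ((a2.toNat * a2.toNat * b2.toNat : ℕ) : ℤ) := by
        push_cast
        rw [Int.toNat_of_nonneg (by omega), Int.toNat_of_nonneg (by omega),
          Int.toNat_of_nonneg (by omega)]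
        exact hgg
      exact_mod_cast hc
    have hle2 : racineAltLoop 1 1 n ≤ a2 := by
      have := Nat.le_of_dvd (by omega) hKA
      omega
    have hga : racineAltLoop 1 1 n = a2 := le_antisymm hle2 hle1
    have hfd : PySem.Int.floordiv n (racineAltLoop 1 1 n * racineAltLoop 1 1 n) = b2 := by
      rw [hga, PySem.Int.floordiv_eq_ediv_of_pos (by nlinarith), ← hn_eq]
      exact Int.mul_ediv_cancel_left b2 (by nlinarith)
    have hB : racine_alt n = some (a2, b2) := by
      simp only [racine_alt]
      rw [if_neg hn2]
      rw [hga] at hfd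
      simp only [hga, hfd]
    rw [hA, hB]
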